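-- pv_equiv track=rewrite | github.com/lilindu/cryo-tdk-killers | relabel_tree_with_lineage.py | relabel_newick_leaves
-- ===== SOURCE A (Python) =====
-- from typing import Dict, List, Tuple, Optional
--
-- def relabel_newick_leaves(newick_text: str, mapping: Dict[str, str]) -> str:
--     """
--     Relabel leaf names in a Newick string by replacing taxon mnemonic occurrences.
--
--     - Detect leaf tokens (names immediately following '(' or ',' and before ':'/','/')')
--     - If a mnemonic key from mapping is found within the leaf token, replace that
--       mnemonic substring with the formatted lineage label, preserving any suffix
--       (e.g., "/205-277").
--
--     Args:
--         newick_text: Original Newick content as a single-line string.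
--         mapping: Dict of mnemonic -> lineage label.
--
--     Returns:
--         Modified Newick string with relabeled leaves.
--     """
--     out_chars: List[str] = []
--     i = 0
--     n = len(newick_text)
--     expecting_label = False
--
--     # Precompute keys sorted by length (longest first) to avoid partial matches
--     keys_sorted = sorted(mapping.keys(), key=len, reverse=True)
--
--     while i < n:
--         ch = newick_text[i]
--         out_chars.append(ch)
--
--         if ch == '(' or ch == ',':
--             # Next token could be a leaf name
--             expecting_label = True
--             i += 1
--             # Peek ahead: if next is '(' or ')' or ',' treat accordingly
--             if i < n and newick_text[i] in '(),':
--                 expecting_label = False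
--             else:
--                 # Capture the token until a delimiter ':', ',', or ')'
--                 start = i
--                 while i < n and newick_text[i] not in ':,)':
--                     i += 1
--                 token = newick_text[start:i]
--
--                 # Attempt replacement if any mnemonic key is present
--                 replaced = token
--                 for key in keys_sorted:
--                     if key and key in token:
--                         replaced = token.replace(key, mapping[key])
--                         break
--
--                 out_chars.append(replaced)
--
--                 expecting_label = False
--                 # Do not advance i here; the loop will handle delimiter at position i
--                 continue
--         else:
--             expecting_label = False
--             i += 1
--
--     return "".join(out_chars)
-- ===== SOURCE B (Python) =====
-- def relabel_newick_leaves(newick_text: str, mapping: dict) -> str: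
--     """Trie-based rewrite: build a prefix trie of the mnemonics once, split the text
--     into (is_leaf, text) segments, and relabel each leaf token by walking the trie
--     from every suffix of the token, keeping the longest (earliest on ties) match."""
--     root = [None, {}]  # node = [terminal (order, key, value) or None, children dict]
--     for order, (key, val) in enumerate(mapping.items()):
--         if not key:
--             continue
--         node = root
--         for ch in key:
--             node = node[1].setdefault(ch, [None, {}])
--         if node[0] is None:
--             node[0] = (order, key, val)
--
--     def best_match(token):
--         best = None
--         for p in range(len(token)):
--             node = root
--             for ch in token[p:]:
--                 if ch not in node[1]:
--                     break
--                 node = node[1][ch]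
--                 t = node[0]
--                 if t is not None and (best is None or
--                         (len(t[1]), -t[0]) > (len(best[1]), -best[0])):
--                     best = t
--         return best
--
--     def fix(token):
--         b = best_match(token)
--         return token if b is None else token.replace(b[1], b[2])
--
--     segs = []
--     i, n = 0, len(newick_text)
--     while i < n:
--         c = newick_text[i]
--         if c in '(,' and not (i + 1 < n and newick_text[i + 1] in '(),'):
--             j = i + 1
--             while j < n and newick_text[j] not in ':,)':
--                 j += 1
--             segs.append((False, c))
--             segs.append((True, newick_text[i + 1:j]))
--             i = j
--         else:
--             segs.append((False, c))
--             i += 1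
--     return ''.join(fix(t) if is_leaf else t for is_leaf, t in segs)
-- ===== Notes on version B (the rewrite author's own statement) =====
-- stated objective: alternative
-- what changed: B builds a prefix trie of the mnemonics once and relabels each leaf token by walking the trie from every token suffix keeping the longest (earliest-inserted on ties) match, after splitting the text into (is_leaf, text) segments, instead of A's char-by-char emitter that length-sorts the keys and runs a substring test per key per token.
import Mathlib
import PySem

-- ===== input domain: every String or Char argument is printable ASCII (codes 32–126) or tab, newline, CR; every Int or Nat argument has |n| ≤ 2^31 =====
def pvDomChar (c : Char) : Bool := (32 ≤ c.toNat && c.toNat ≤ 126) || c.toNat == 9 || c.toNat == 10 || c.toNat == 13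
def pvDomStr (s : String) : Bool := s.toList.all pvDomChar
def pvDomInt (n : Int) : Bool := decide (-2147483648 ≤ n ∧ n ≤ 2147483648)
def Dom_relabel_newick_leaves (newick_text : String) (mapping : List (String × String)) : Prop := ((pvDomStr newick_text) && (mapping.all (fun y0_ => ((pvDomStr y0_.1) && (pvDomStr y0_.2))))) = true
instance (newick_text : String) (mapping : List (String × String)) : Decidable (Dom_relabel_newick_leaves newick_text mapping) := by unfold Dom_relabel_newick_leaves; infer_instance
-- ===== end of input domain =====

-- ===== PORT A =====
-- B rebuilds the relabeller around a prefix trie of the mnemonics (multi-pattern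
-- matching by walking the trie from every token suffix) and a tokenize-then-map
-- pass, instead of A's char-by-char emitter with per-key substring tests on a
-- length-sorted key list (objective: alternative).

-- char classes of A's scanner ('(,' / '(),' / ':,)')
def pvOpenComma (c : Char) : Bool := c = '(' || c = ','
def pvPeekSkip (c : Char) : Bool := c = '(' || c = ')' || c = ','
def pvStop (c : Char) : Bool := c = ':' || c = ',' || c = ')'

-- mapping[key]: first-match association-list lookup (Python dict lookup)
def pvLookup (m : List (List Char × List Char)) (k : List Char) : List Char :=
  ((m.find? (fun p => p.1 == k)).map (·.2)).getD []

-- A's inner 'for key in keys_sorted: if key and key in token: replaced = …; break'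
def pvFixA (m : List (List Char × List Char)) (ks : List (List Char)) (tok : List Char) :
    List Char :=
  match ks.find? (fun k => !k.isEmpty && PySem.Chars.isIn k tok) with
  | some k => PySem.Chars.replace tok k (pvLookup m k)
  | none => tok

-- A's main 'while i < n' loop (out_chars accumulator; the inner token while = span)
def pvLoopA (m : List (List Char × List Char)) (ks : List (List Char))
    (cs : List Char) (out : List (List Char)) : List (List Char) :=
  match cs with
  | [] => out
  | ch :: rest =>
    if pvOpenComma ch then
      if (match rest with | c2 :: _ => pvPeekSkip c2 | [] => false) then
        pvLoopA m ks rest (out ++ [[ch]])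
      else
        pvLoopA m ks (rest.dropWhile (fun c => !pvStop c))
          (out ++ [[ch]] ++ [pvFixA m ks (rest.takeWhile (fun c => !pvStop c))])
    else
      pvLoopA m ks rest (out ++ [[ch]])
  termination_by cs.length
  decreasing_by
  · simp
  · have := List.length_dropWhile_le (fun c => !pvStop c) rest; simp; omega
  · simp

def relabel_newick_leaves (newick_text : String) (mapping : List (String × String)) : String :=
  String.ofList (pvLoopA (mapping.map (fun p => (p.1.toList, p.2.toList)))
    (PySem.List.sorted ((mapping.map (fun p => (p.1.toList, p.2.toList))).map (·.1))
      (fun k => k.length) true)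
    newick_text.toList []).flatten

-- ===== PORT B =====
-- entry = (order, (key, value)) as produced by enumerate(mapping.items())
-- trie children dicts are rendered as assoc lists in first-child/next-sibling form
inductive PvTrie where
  | nil : PvTrie
  | node : Char → Option (Int × (List Char × List Char)) → PvTrie → PvTrie → PvTrie

-- chain of fresh nodes for the rest of a key ([None, {}] nodes from setdefault)
def pvFresh (c : Char) (ks : List Char) (i : Int × (List Char × List Char)) : PvTrie :=
  match ks with
  | [] => .node c (some i) .nil .nil
  | k :: ks' => .node c none (pvFresh k ks' i) .nil

-- insert one key: walk/extend children (setdefault), set terminal only if unset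
def pvIns (t : PvTrie) (c : Char) (ks : List Char) (i : Int × (List Char × List Char)) :
    PvTrie :=
  match t with
  | .nil => pvFresh c ks i
  | .node c' term kids sib =>
    if c' = c then
      match ks with
      | [] => .node c' (match term with | none => some i | some x => some x) kids sib
      | k :: ks' => .node c' term (pvIns kids k ks' i) sib
    else .node c' term kids (pvIns sib c ks i)
  termination_by (ks.length, sizeOf t)

-- the 'for order, (key, val) in enumerate(mapping.items())' build loop
def pvBuild (m : List (List Char × List Char)) : PvTrie :=
  (PySem.List.enumerate m 0).foldl
    (fun t e => match e.2.1 with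
      | [] => t
      | c :: ks => pvIns t c ks e) .nil

-- '(len(t[1]), -t[0]) > (len(best[1]), -best[0])'
def pvBeats (x y : Int × (List Char × List Char)) : Bool :=
  y.2.1.length < x.2.1.length || (x.2.1.length == y.2.1.length && x.1 < y.1)

-- 'if t is not None and (best is None or …): best = t'
def pvBetter (best t : Option (Int × (List Char × List Char))) :
    Option (Int × (List Char × List Char)) :=
  match t with
  | none => best
  | some i =>
    match best with
    | none => some i
    | some b => if pvBeats i b then some i else some b

-- inner 'for ch in token[p:]' walk (break when the child is absent)
def pvWalk (t : PvTrie) (cs : List Char)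
    (best : Option (Int × (List Char × List Char))) :
    Option (Int × (List Char × List Char)) :=
  match t, cs with
  | _, [] => best
  | .nil, _ => best
  | .node c' term kids sib, c :: rest =>
    if c' = c then pvWalk kids rest (pvBetter best term)
    else pvWalk sib (c :: rest) best
  termination_by (cs.length, sizeOf t)

-- 'for p in range(len(token)): …'
def pvBestMatch (root : PvTrie) (tok : List Char) :
    Option (Int × (List Char × List Char)) :=
  (List.range tok.length).foldl (fun best p => pvWalk root (tok.drop p) best) none

-- 'fix(token)'
def pvFixT (root : PvTrie) (tok : List Char) : List Char :=
  match pvBestMatch root tok with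
  | some e => PySem.Chars.replace tok e.2.1 e.2.2
  | none => tok

-- B's tokenizer: the text as a list of (is_leaf, text) segments
def pvTok (cs : List Char) : List (Bool × List Char) :=
  match cs with
  | [] => []
  | c :: rest =>
    if pvOpenComma c && !(match rest with | c2 :: _ => pvPeekSkip c2 | [] => false) then
      (false, [c]) :: (true, rest.takeWhile (fun x => !pvStop x)) ::
        pvTok (rest.dropWhile (fun x => !pvStop x))
    else
      (false, [c]) :: pvTok rest
  termination_by cs.length
  decreasing_by
  · have := List.length_dropWhile_le (fun x => !pvStop x) rest; simp; omega
  · simp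

def relabel_newick_leaves_alt (newick_text : String) (mapping : List (String × String)) :
    String :=
  String.ofList ((pvTok newick_text.toList).map
    (fun seg =>
      if seg.1 then pvFixT (pvBuild (mapping.map (fun p => (p.1.toList, p.2.toList)))) seg.2
      else seg.2)).flatten

-- ===== PRECONDITION & SPEC =====
def Spec_relabel_newick_leaves (newick_text : String) (mapping : List (String × String)) (out : String) : Prop := out = relabel_newick_leaves_alt newick_text mapping
instance (newick_text : String) (mapping : List (String × String)) (out : String) : Decidable (Spec_relabel_newick_leaves newick_text mapping out) := by unfold Spec_relabel_newick_leaves; infer_instance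

-- ===== CLAIM (what is proved, stated in full; the proofs are below) =====
def Claim_equal_relabel_newick_leaves : Prop := ∀ (newick_text : String) (mapping : List (String × String)), Dom_relabel_newick_leaves newick_text mapping → Spec_relabel_newick_leaves newick_text mapping (relabel_newick_leaves newick_text mapping)


-- ===== LEMMAS AND PROOFS =====

-- follow the exact path c :: ks down a children list, returning the terminal there
def pvFollow (t : PvTrie) (c : Char) (ks : List Char) :
    Option (Int × (List Char × List Char)) :=
  match t with
  | .nil => none
  | .node c' term kids sib =>
    if c' = c then match ks with | [] => term | k :: ks' => pvFollow kids k ks'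
    else pvFollow sib c ks
  termination_by (ks.length, sizeOf t)

theorem pvFollow_nil (c : Char) (ks : List Char) :
    pvFollow PvTrie.nil c ks = none := by
  rw [pvFollow.eq_def]

theorem pvFollow_node (c' : Char) (term : Option (Int × (List Char × List Char)))
    (kids sib : PvTrie) (c : Char) (ks : List Char) :
    pvFollow (PvTrie.node c' term kids sib) c ks =
      if c' = c then (match ks with | [] => term | k :: ks' => pvFollow kids k ks')
      else pvFollow sib c ks := by
  rw [pvFollow.eq_def]

theorem pvIns_nil (c : Char) (ks : List Char) (i : Int × (List Char × List Char)) :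
    pvIns PvTrie.nil c ks i = pvFresh c ks i := by
  rw [pvIns.eq_def]

theorem pvIns_node (c' : Char) (term : Option (Int × (List Char × List Char)))
    (kids sib : PvTrie) (c : Char) (ks : List Char) (i : Int × (List Char × List Char)) :
    pvIns (PvTrie.node c' term kids sib) c ks i =
      if c' = c then
        match ks with
        | [] => PvTrie.node c' (match term with | none => some i | some x => some x) kids sib
        | k :: ks' => PvTrie.node c' term (pvIns kids k ks' i) sib
      else PvTrie.node c' term kids (pvIns sib c ks i) := by
  rw [pvIns.eq_def]

theorem pvFollow_fresh (ks : List Char) (c c' : Char) (ks' : List Char)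
    (i : Int × (List Char × List Char)) :
    pvFollow (pvFresh c ks i) c' ks' =
      if c = c' ∧ ks = ks' then some i else none := by
  induction ks generalizing c c' ks' with
  | nil =>
    by_cases h : c = c'
    · subst h
      cases ks' with
      | nil => simp [pvFresh, pvFollow_node]
      | cons k t => simp [pvFresh, pvFollow_node, pvFollow_nil]
    · simp [pvFresh, pvFollow_node, pvFollow_nil, h]
  | cons k ks ih =>
    by_cases h : c = c'
    · subst h
      cases ks' with
      | nil => simp [pvFresh, pvFollow_node]
      | cons k' ks'' => simp [pvFresh, pvFollow_node, ih k k' ks'']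
    · simp [pvFresh, pvFollow_node, pvFollow_nil, h]

theorem pvFollow_ins (t : PvTrie) (c : Char) (ks : List Char)
    (i : Int × (List Char × List Char)) (c' : Char) (ks' : List Char) :
    pvFollow (pvIns t c ks i) c' ks' =
      if c = c' ∧ ks = ks' then
        (match pvFollow t c' ks' with | none => some i | some x => some x)
      else pvFollow t c' ks' := by
  induction t, c, ks using pvIns.induct generalizing c' ks' with
  | case1 c ks =>
    rw [pvIns_nil, pvFollow_fresh, pvFollow_nil]
  | case2 c'' term kids sib =>
    rw [pvIns_node, if_pos rfl]
    by_cases h2 : c'' = c'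
    · subst h2
      cases ks' with
      | nil =>
        simp only [pvFollow_node, if_pos rfl]
        cases term <;> rfl
      | cons k' t' => simp [pvFollow_node]
    · simp [pvFollow_node, h2, fun hh : c'' = c' => h2 hh]
  | case3 c'' term kids sib k ks2 ih =>
    rw [pvIns_node, if_pos rfl]
    by_cases h2 : c'' = c'
    · subst h2
      cases ks' with
      | nil => simp [pvFollow_node]
      | cons k' ks'' =>
        simp only [pvFollow_node, if_pos rfl, ih k' ks'']
        by_cases hk : k = k' ∧ ks2 = ks''
        · simp [hk]
        · have : ¬ (c'' = c'' ∧ k :: ks2 = k' :: ks'') := by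
            simpa using fun h1 h2 => hk ⟨h1, h2⟩
          simp [hk, this]
    · simp [pvFollow_node, h2]
  | case4 c ks c'' term kids sib h ih =>
    rw [pvIns_node, if_neg h]
    by_cases h2 : c'' = c'
    · subst h2
      have hne : ¬ (c = c'' ∧ ks = ks') := by rintro ⟨rfl, -⟩; exact h rfl
      simp [pvFollow_node, hne]
    · simp [pvFollow_node, h2, ih]

theorem pvFollow_foldl (l : List (Int × (List Char × List Char))) (t : PvTrie)
    (c : Char) (ks : List Char) :
    pvFollow (l.foldl (fun t e => match e.2.1 with
      | [] => t
      | c :: ks => pvIns t c ks e) t) c ks =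
      match pvFollow t c ks with
      | some x => some x
      | none => l.find? (fun e => e.2.1 == c :: ks) := by
  induction l generalizing t with
  | nil => cases h : pvFollow t c ks <;> simp [h]
  | cons e l ih =>
    cases hk : e.2.1 with
    | nil =>
      have hb : (e.2.1 == c :: ks) = false := by simp [hk]
      simp only [List.foldl_cons, List.find?_cons, hb, cond_false, hk]
      exact ih t
    | cons c0 ks0 =>
      simp only [List.foldl_cons, List.find?_cons, hk]
      rw [ih, pvFollow_ins]
      by_cases h : c0 = c ∧ ks0 = ks
      · obtain ⟨rfl, rfl⟩ := h
        have hb : ((c0 :: ks0 : List Char) == c0 :: ks0) = true := by simp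
        rw [if_pos (And.intro rfl rfl)]
        simp only [hb, cond_true]
        cases pvFollow t c0 ks0 <;> rfl
      · have hb : ((c0 :: ks0 : List Char) == c :: ks) = false :=
          beq_eq_false_iff_ne.mpr (by intro hh; injection hh with h1 h2; exact h ⟨h1, h2⟩)
        rw [if_neg h]
        cases hpv : pvFollow t c ks <;> simp [hb]

theorem pvFollow_build (m : List (List Char × List Char)) (c : Char) (ks : List Char) :
    pvFollow (pvBuild m) c ks =
      (PySem.List.enumerate m 0).find? (fun e => e.2.1 == c :: ks) := by
  rw [pvBuild, pvFollow_foldl]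
  simp [pvFollow]

theorem pvWalk_cs_nil (t : PvTrie) (best : Option (Int × (List Char × List Char))) :
    pvWalk t [] best = best := by
  cases t <;> rw [pvWalk.eq_def]

theorem pvWalk_t_nil (cs : List Char) (best : Option (Int × (List Char × List Char))) :
    pvWalk PvTrie.nil cs best = best := by
  cases cs <;> rw [pvWalk.eq_def]

theorem pvWalk_node (c' : Char) (term : Option (Int × (List Char × List Char)))
    (kids sib : PvTrie) (c : Char) (rest : List Char)
    (best : Option (Int × (List Char × List Char))) :
    pvWalk (PvTrie.node c' term kids sib) (c :: rest) best =
      if c' = c then pvWalk kids rest (pvBetter best term)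
      else pvWalk sib (c :: rest) best := by
  rw [pvWalk.eq_def]

-- the matches a walk from t along every nonempty prefix of cs can collect
def pvCands (t : PvTrie) (cs : List Char) : List (Int × (List Char × List Char)) :=
  (List.range cs.length).filterMap (fun j =>
    match cs.take (j+1) with
    | [] => none
    | c :: p => pvFollow t c p)

-- one accumulation step of the running best
def pvStepB (b : Option (Int × (List Char × List Char)))
    (i : Int × (List Char × List Char)) : Option (Int × (List Char × List Char)) :=
  pvBetter b (some i)

theorem pvCands_cs_nil (t : PvTrie) : pvCands t [] = [] := by
  simp [pvCands]

theorem pvCands_t_nil (cs : List Char) : pvCands PvTrie.nil cs = [] := by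
  rw [pvCands, List.filterMap_eq_nil_iff]
  intro j _
  cases cs.take (j+1) <;> simp [pvFollow_nil]

theorem pvCands_cons (c' : Char) (term : Option (Int × (List Char × List Char)))
    (kids sib : PvTrie) (c : Char) (rest : List Char) :
    pvCands (PvTrie.node c' term kids sib) (c :: rest) =
      if c' = c then
        (match term with | none => [] | some i => [i]) ++ pvCands kids rest
      else pvCands sib (c :: rest) := by
  by_cases h : c' = c
  · subst h
    rw [pvCands, List.length_cons, List.range_succ_eq_map, List.filterMap_cons,
      List.filterMap_map, if_pos rfl]
    have h0 : (match (c' :: rest).take (0+1) with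
        | [] => none
        | c :: p => pvFollow (PvTrie.node c' term kids sib) c p) = term := by
      simp [pvFollow_node]
    rw [h0]
    have h1 : ((List.range rest.length).filterMap
        ((fun j => match (c' :: rest).take (j+1) with
          | [] => none
          | c :: p => pvFollow (PvTrie.node c' term kids sib) c p) ∘ Nat.succ)) =
        pvCands kids rest := by
      rw [pvCands]
      apply List.filterMap_congr
      intro j hj
      rw [List.mem_range] at hj
      simp only [Function.comp]
      rw [List.take_succ_cons]
      show pvFollow (PvTrie.node c' term kids sib) c' (rest.take (j + 1)) =
        (match rest.take (j+1) with | [] => none | c :: p => pvFollow kids c p)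
      rw [pvFollow_node, if_pos rfl]
      cases htk : rest.take (j+1) with
      | nil =>
        exact absurd htk (by apply List.ne_nil_of_length_pos; rw [List.length_take]; omega)
      | cons k p => rfl
    rw [h1]
    cases term <;> rfl
  · rw [if_neg h, pvCands, pvCands]
    apply List.filterMap_congr
    intro j _
    rw [List.take_succ_cons]
    show pvFollow (PvTrie.node c' term kids sib) c (rest.take j) =
      (match c :: rest.take j with | [] => none | c :: p => pvFollow sib c p)
    rw [pvFollow_node, if_neg h]

theorem pvWalk_eq_fold (t : PvTrie) (cs : List Char)
    (best : Option (Int × (List Char × List Char))) :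
    pvWalk t cs best = (pvCands t cs).foldl pvStepB best := by
  induction t, cs, best using pvWalk.induct with
  | case1 t best => rw [pvWalk_cs_nil, pvCands_cs_nil]; rfl
  | case2 cs best h => rw [pvWalk_t_nil, pvCands_t_nil]; rfl
  | case3 best term kids sib c rest ih =>
    rw [pvWalk_node, if_pos rfl, pvCands_cons, if_pos rfl, List.foldl_append, ih]
    cases term <;> rfl
  | case4 best c' term kids sib c rest h ih =>
    rw [pvWalk_node, if_neg h, pvCands_cons, if_neg h, ih]

-- every match the whole best_match scan can see
def pvAll (root : PvTrie) (tok : List Char) : List (Int × (List Char × List Char)) :=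
  (List.range tok.length).flatMap (fun p => pvCands root (tok.drop p))

theorem pvBestMatch_eq_fold (root : PvTrie) (tok : List Char) :
    pvBestMatch root tok = (pvAll root tok).foldl pvStepB none := by
  rw [pvBestMatch, pvAll]
  generalize none = b
  generalize List.range tok.length = l
  induction l generalizing b with
  | nil => rfl
  | cons p l ih =>
    rw [List.foldl_cons, List.flatMap_cons, List.foldl_append, pvWalk_eq_fold, ih]

theorem pvMem_pvAll_iff (m : List (List Char × List Char)) (tok : List Char)
    (x : Int × (List Char × List Char)) :
    x ∈ pvAll (pvBuild m) tok ↔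
      (x.2.1 ≠ [] ∧ PySem.Chars.isIn x.2.1 tok = true ∧
        (PySem.List.enumerate m 0).find? (fun e => e.2.1 == x.2.1) = some x) := by
  constructor
  · intro hx
    rw [pvAll, List.mem_flatMap] at hx
    obtain ⟨p, hp, hx⟩ := hx
    rw [pvCands, List.mem_filterMap] at hx
    obtain ⟨j, hj, hx⟩ := hx
    rw [List.mem_range] at hj
    cases htk : (tok.drop p).take (j+1) with
    | nil =>
      exact absurd htk (by apply List.ne_nil_of_length_pos; rw [List.length_take]; omega)
    | cons c q =>
      rw [htk] at hx
      replace hx : (PySem.List.enumerate m 0).find? (fun e => e.2.1 == c :: q) = some x := by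
        rw [← pvFollow_build]; exact hx
      have hpred := List.find?_some hx
      have hkey : x.2.1 = c :: q := by simpa using hpred
      have hpre : x.2.1 <+: tok.drop p := by rw [hkey, ← htk]; exact List.take_prefix _ _
      refine ⟨by simp [hkey], ?_, ?_⟩
      · exact (PySem.Chars.exists_prefix_drop_iff_isIn _ _).1 ⟨p, hpre⟩
      · rw [← hkey] at hx; exact hx
  · rintro ⟨hne, hin, hfind⟩
    obtain ⟨p, hpre⟩ := (PySem.Chars.exists_prefix_drop_iff_isIn _ _).2 hin
    have hlen : x.2.1.length ≤ (tok.drop p).length := hpre.length_le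
    have hxpos : 0 < x.2.1.length := List.length_pos_iff.2 hne
    have hplt : p < tok.length := by
      rw [List.length_drop] at hlen; omega
    rw [pvAll, List.mem_flatMap]
    refine ⟨p, List.mem_range.2 hplt, ?_⟩
    rw [pvCands, List.mem_filterMap]
    refine ⟨x.2.1.length - 1, ?_, ?_⟩
    · rw [List.mem_range]; omega
    · have htk : (tok.drop p).take (x.2.1.length - 1 + 1) = x.2.1 := by
        rw [Nat.sub_add_cancel hxpos]
        exact (List.prefix_iff_eq_take.1 hpre).symm
      rw [htk]
      cases hk : x.2.1 with
      | nil => exact absurd hk hne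
      | cons c q =>
        show pvFollow (pvBuild m) c q = some x
        rw [pvFollow_build, ← hk, hfind]

theorem pvBeats_false_iff (x y : Int × (List Char × List Char)) :
    pvBeats x y = false ↔
      (x.2.1.length < y.2.1.length ∨ (x.2.1.length = y.2.1.length ∧ y.1 ≤ x.1)) := by
  simp only [pvBeats, Bool.or_eq_false_iff, Bool.and_eq_false_iff, decide_eq_false_iff_not,
    Nat.not_lt, beq_eq_false_iff_ne, ne_eq, Int.not_lt]
  constructor
  · rintro ⟨h1, h2 | h2⟩ <;> omega
  · rintro (h | ⟨h1, h2⟩)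
    · exact ⟨by omega, by omega⟩
    · exact ⟨by omega, Or.inr (by omega)⟩

theorem pvBeats_true_iff (x y : Int × (List Char × List Char)) :
    pvBeats x y = true ↔
      (y.2.1.length < x.2.1.length ∨ (x.2.1.length = y.2.1.length ∧ x.1 < y.1)) := by
  simp only [pvBeats, Bool.or_eq_true, Bool.and_eq_true, decide_eq_true_eq, beq_iff_eq]

theorem pvBeats_irrefl (x : Int × (List Char × List Char)) : pvBeats x x = false := by
  rw [pvBeats_false_iff]; omega

theorem pvBeats_trans_false {x y z : Int × (List Char × List Char)}
    (h1 : pvBeats x y = false) (h2 : pvBeats y z = false) : pvBeats x z = false := by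
  rw [pvBeats_false_iff] at *; omega

theorem pvBeats_asymm {x y : Int × (List Char × List Char)}
    (h : pvBeats x y = true) : pvBeats y x = false := by
  rw [pvBeats_true_iff] at h; rw [pvBeats_false_iff]; omega

-- one step of the best accumulator is dominated by neither input
theorem pvStepB_isSome (b : Option (Int × (List Char × List Char)))
    (i : Int × (List Char × List Char)) : ∃ c, pvStepB b i = some c := by
  cases b with
  | none => exact ⟨i, rfl⟩
  | some bv =>
    by_cases h : pvBeats i bv = true
    · exact ⟨i, by simp [pvStepB, pvBetter, h]⟩
    · exact ⟨bv, by simp [pvStepB, pvBetter, h]⟩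

theorem pvStepB_spec (b : Option (Int × (List Char × List Char)))
    (i c : Int × (List Char × List Char)) (h : pvStepB b i = some c) :
    (c = i ∨ b = some c) ∧ pvBeats i c = false ∧
      (∀ z, b = some z → pvBeats z c = false) := by
  cases b with
  | none =>
    simp only [pvStepB, pvBetter, Option.some.injEq] at h
    subst h
    exact ⟨Or.inl rfl, pvBeats_irrefl i, by simp⟩
  | some bv =>
    by_cases hb : pvBeats i bv = true
    · simp only [pvStepB, pvBetter, hb, if_pos] at h
      injection h with h; subst h
      exact ⟨Or.inl rfl, pvBeats_irrefl i,
        fun z hz => by injection hz with hz; subst hz; exact pvBeats_asymm hb⟩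
    · have hb' : pvBeats i bv = false := by simpa using hb
      rw [show pvStepB (some bv) i = some bv by simp [pvStepB, pvBetter, hb']] at h
      injection h with h; subst h
      exact ⟨Or.inr rfl, hb',
        fun z hz => by injection hz with hz; subst hz; exact pvBeats_irrefl _⟩

theorem pvFoldl_stepB_none_iff (l : List (Int × (List Char × List Char)))
    (b : Option (Int × (List Char × List Char))) :
    l.foldl pvStepB b = none ↔ b = none ∧ l = [] := by
  induction l generalizing b with
  | nil => simp
  | cons i l ih =>
    rw [List.foldl_cons, ih]
    obtain ⟨c, hc⟩ := pvStepB_isSome b i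
    simp [hc]

theorem pvFoldl_stepB_mem (l : List (Int × (List Char × List Char)))
    (b : Option (Int × (List Char × List Char))) (x : Int × (List Char × List Char))
    (h : l.foldl pvStepB b = some x) : x ∈ l ∨ b = some x := by
  induction l generalizing b with
  | nil => exact Or.inr h
  | cons i l ih =>
    rw [List.foldl_cons] at h
    rcases ih _ h with hm | hm
    · exact Or.inl (List.mem_cons_of_mem _ hm)
    · rcases (pvStepB_spec b i x hm).1 with rfl | hb
      · exact Or.inl List.mem_cons_self
      · exact Or.inr hb

theorem pvFoldl_stepB_dom (l : List (Int × (List Char × List Char)))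
    (b : Option (Int × (List Char × List Char))) (x : Int × (List Char × List Char))
    (h : l.foldl pvStepB b = some x) :
    (∀ y ∈ l, pvBeats y x = false) ∧ (∀ z, b = some z → pvBeats z x = false) := by
  induction l generalizing b with
  | nil =>
    refine ⟨by simp, fun z hz => ?_⟩
    rw [List.foldl_nil] at h
    rw [h] at hz; injection hz with hz; subst hz; exact pvBeats_irrefl x
  | cons i l ih =>
    rw [List.foldl_cons] at h
    obtain ⟨c, hc⟩ := pvStepB_isSome b i
    obtain ⟨hci, hcib, hcz⟩ := pvStepB_spec b i c hc
    have hdom := ih _ h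
    have hcx : pvBeats c x = false := hdom.2 c hc
    constructor
    · intro y hy
      rcases List.mem_cons.1 hy with rfl | hy
      · exact pvBeats_trans_false hcib hcx
      · exact hdom.1 y hy
    · intro z hz
      exact pvBeats_trans_false (hcz z hz) hcx

-- the one-pass longest-so-far step hiding in A's sorted find? (match predicate P)
def pvStep (P : List Char → Bool) (best : Option (List Char)) (k : List Char) :
    Option (List Char) :=
  if P k && (match best with | none => true | some b => decide (b.length < k.length)) then
    some k
  else best

theorem pvMem_insertBy (x z : List Char) (l : List (List Char))
    (before : List Char → List Char → Bool)
    (h : z ∈ PySem.List.insertBy before x l) : z ∈ l ∨ z = x := by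
  induction l with
  | nil => simp [PySem.List.insertBy] at h; tauto
  | cons y ys ih =>
    simp only [PySem.List.insertBy] at h
    split at h
    · simp only [List.mem_cons] at h ⊢; tauto
    · simp only [List.mem_cons] at h ⊢
      rcases h with h | h
      · tauto
      · rcases ih h with h' | h' <;> tauto

-- insertion keeps the accumulator sorted by nonincreasing length
theorem pvInsertBy_pairwise (x : List Char) (l : List (List Char))
    (h : l.Pairwise (fun a b => b.length ≤ a.length)) :
    (PySem.List.insertBy (fun a b => decide (b.length < a.length)) x l).Pairwise
      (fun a b => b.length ≤ a.length) := by
  induction l with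
  | nil => simp [PySem.List.insertBy]
  | cons y ys ih =>
    rcases List.pairwise_cons.mp h with ⟨hy, hys⟩
    simp only [PySem.List.insertBy]
    split
    · rename_i hlt
      simp only [decide_eq_true_eq] at hlt
      refine List.pairwise_cons.mpr ⟨?_, h⟩
      intro z hz
      rcases List.mem_cons.mp hz with rfl | hz
      · omega
      · have := hy z hz; omega
    · rename_i hge
      have hge' : ¬ y.length < x.length := by simpa using hge
      refine List.pairwise_cons.mpr ⟨?_, ih hys⟩
      intro z hz
      rcases pvMem_insertBy x z ys _ hz with h' | rfl
      · exact hy z h'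
      · omega

-- find? over the sorted accumulator after one insertion = one step of the pass
theorem pvFind_insertBy (P : List Char → Bool) (x : List Char) (l : List (List Char))
    (h : l.Pairwise (fun a b => b.length ≤ a.length)) :
    (PySem.List.insertBy (fun a b => decide (b.length < a.length)) x l).find? P =
      pvStep P (l.find? P) x := by
  induction l with
  | nil =>
    cases hPx : P x <;> simp [PySem.List.insertBy, pvStep, List.find?, hPx]
  | cons y ys ih =>
    rcases List.pairwise_cons.mp h with ⟨hy, hys⟩
    simp only [PySem.List.insertBy]
    split
    · rename_i hlt
      simp only [decide_eq_true_eq] at hlt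
      rw [List.find?_cons]
      cases hPx : P x with
      | false => simp [pvStep, hPx]
      | true =>
        have hcond : (match (y :: ys).find? P with
            | none => true
            | some b => decide (b.length < x.length)) = true := by
          cases hfind : (y :: ys).find? P with
          | none => rfl
          | some b =>
            have hb := List.mem_of_find?_eq_some hfind
            rcases List.mem_cons.mp hb with rfl | hb
            · simp only [decide_eq_true_eq]; omega
            · have := hy b hb; simp only [decide_eq_true_eq]; omega
        simp [pvStep, hPx, hcond]
    · rename_i hge
      have hge' : ¬ y.length < x.length := by simpa using hge
      rw [List.find?_cons, List.find?_cons]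
      cases hPy : P y with
      | true =>
        simp only [pvStep]
        rw [if_neg]
        simp only [Bool.and_eq_true, decide_eq_true_eq, not_and]
        intro _; omega
      | false =>
        exact ih hys

-- folding the longest-so-far step over the keys = find? over the fully sorted keys
theorem pvFind_foldl (P : List Char → Bool) (xs l : List (List Char))
    (h : l.Pairwise (fun a b => b.length ≤ a.length)) :
    (xs.foldl (fun acc x =>
        PySem.List.insertBy (fun a b => decide (b.length < a.length)) x acc) l).find? P =
      xs.foldl (pvStep P) (l.find? P) := by
  induction xs generalizing l with
  | nil => rfl
  | cons x xs ih =>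
    simp only [List.foldl_cons]
    rw [ih _ (pvInsertBy_pairwise x l h), pvFind_insertBy P x l h]

-- A's find? over the length-sorted keys, rendered as a fold over the keys in order
theorem pvFindA_eq_foldl (m : List (List Char × List Char)) (P : List Char → Bool) :
    (PySem.List.sorted (m.map (·.1)) (fun k => k.length) true).find? P =
      (m.map (·.1)).foldl (pvStep P) none := by
  have hsort : PySem.List.sorted (m.map (·.1)) (fun k : List Char => k.length) true =
      (m.map (·.1)).foldl (fun acc x =>
        PySem.List.insertBy (fun a b => decide (b.length < a.length)) x acc) [] := by
    simp [PySem.List.sorted]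
  rw [hsort, pvFind_foldl _ _ [] (by simp), List.find?_nil]

-- A's longest-so-far key fold runs in lockstep with the best-entry fold
theorem pvSim (P : List Char → Bool) (l : List (Int × (List Char × List Char)))
    (ak : Option (List Char)) (ae : Option (Int × (List Char × List Char)))
    (h1 : ae = none → ak = none)
    (h2 : ∀ e, ae = some e → ak = some e.2.1 ∧ ∀ y ∈ l, e.1 < y.1)
    (hpair : l.Pairwise (fun a b => a.1 < b.1)) :
    (l.map (fun e => e.2.1)).foldl (pvStep P) ak =
      ((l.filter (fun e => P e.2.1)).foldl pvStepB ae).map (fun e => e.2.1) := by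
  induction l generalizing ak ae with
  | nil =>
    cases hae : ae with
    | none => simp [h1 hae]
    | some e => simp [(h2 e hae).1]
  | cons e l ih =>
    rcases List.pairwise_cons.mp hpair with ⟨hh, ht⟩
    simp only [List.map_cons, List.foldl_cons, List.filter_cons]
    by_cases hPe : P e.2.1 = true
    · rw [if_pos hPe, List.foldl_cons]
      cases hae : ae with
      | none =>
        have hak : ak = none := h1 hae
        have hstep : pvStep P ak e.2.1 = some e.2.1 := by simp [pvStep, hPe, hak]
        have hstepB : pvStepB none e = some e := rfl
        rw [hstep, hstepB]
        exact ih (some e.2.1) (some e) (by simp)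
          (fun e' he' => by injection he' with he'; subst he'; exact ⟨rfl, hh⟩) ht
      | some b =>
        obtain ⟨hakb, hord⟩ := h2 b hae
        by_cases hlen : b.2.1.length < e.2.1.length
        · have hstep : pvStep P ak e.2.1 = some e.2.1 := by
            simp [pvStep, hPe, hakb, hlen]
          have hbeats : pvBeats e b = true := by
            rw [pvBeats_true_iff]; omega
          have hstepB : pvStepB (some b) e = some e := by
            simp [pvStepB, pvBetter, hbeats]
          rw [hstep, hstepB]
          exact ih (some e.2.1) (some e)
            (by simp)
            (fun e' he' => by injection he' with he'; subst he'; exact ⟨rfl, hh⟩) ht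
        · have hstep : pvStep P ak e.2.1 = ak := by
            simp [pvStep, hPe, hakb, hlen]
          have horde : b.1 < e.1 := hord e List.mem_cons_self
          have hbeats : pvBeats e b = false := by
            rw [pvBeats_false_iff]; omega
          have hstepB : pvStepB (some b) e = some b := by
            simp [pvStepB, pvBetter, hbeats]
          rw [hstep, hstepB]
          exact ih ak (some b) (by simp)
            (fun e' he' => by
              injection he' with he'; subst he'
              exact ⟨hakb, fun y hy => hord y (List.mem_cons_of_mem _ hy)⟩) ht
    · have hPe' : P e.2.1 = false := by simpa using hPe
      have hstep : pvStep P ak e.2.1 = ak := by simp [pvStep, hPe']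
      rw [hstep, if_neg hPe]
      exact ih ak ae h1 (fun e' he' => ⟨(h2 e' he').1,
        fun y hy => (h2 e' he').2 y (List.mem_cons_of_mem _ hy)⟩) ht

-- find? over enumerate(m) projects to find? over m
theorem pvEnumFind (q : (List Char × List Char) → Bool) (m : List (List Char × List Char)) :
    ∀ s : Int, ((PySem.List.enumerate m s).find? (fun e => q e.2)).map (fun e => e.2) =
      m.find? q := by
  induction m with
  | nil => intro s; simp [PySem.List.enumerate_nil]
  | cons x m ih =>
    intro s
    rw [PySem.List.enumerate_cons, List.find?_cons, List.find?_cons]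
    cases hq : q x with
    | true => simp [hq]
    | false => simp only [hq, cond_false]; exact ih (s+1)

-- the entry of minimal order satisfying q is the one find? returns
theorem pvFind_of_min (l : List (Int × (List Char × List Char)))
    (x : Int × (List Char × List Char)) (q : (Int × (List Char × List Char)) → Bool)
    (hpair : l.Pairwise (fun a b => a.1 < b.1)) (hx : x ∈ l) (hqx : q x = true)
    (hmin : ∀ y ∈ l, q y = true → x.1 ≤ y.1) : l.find? q = some x := by
  induction l with
  | nil => cases hx
  | cons h t ih =>
    rcases List.pairwise_cons.mp hpair with ⟨hh, ht⟩
    cases hq : q h with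
    | true =>
      rcases List.mem_cons.1 hx with rfl | hxt
      · simp [List.find?_cons, hq]
      · exact absurd (hmin h List.mem_cons_self hq) (by have := hh x hxt; omega)
    | false =>
      have hxt : x ∈ t := by
        rcases List.mem_cons.1 hx with rfl | hxt
        · rw [hqx] at hq; cases hq
        · exact hxt
      rw [List.find?_cons, hq]
      exact ih ht hxt (fun y hy hqy => hmin y (List.mem_cons_of_mem _ hy) hqy)

-- orders are distinct along an enumerate-style list
theorem pvFst_inj (l : List (Int × (List Char × List Char)))
    (hpair : l.Pairwise (fun a b => a.1 < b.1))
    (x y : Int × (List Char × List Char)) (hx : x ∈ l) (hy : y ∈ l)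
    (hxy : x.1 = y.1) : x = y := by
  induction l with
  | nil => cases hx
  | cons h t ih =>
    rcases List.pairwise_cons.mp hpair with ⟨hh, ht⟩
    rcases List.mem_cons.1 hx with rfl | hxt
    · rcases List.mem_cons.1 hy with rfl | hyt
      · rfl
      · exact absurd hxy (by have := hh y hyt; omega)
    · rcases List.mem_cons.1 hy with rfl | hyt
      · exact absurd hxy (by have := hh x hxt; omega)
      · exact ih ht hxt hyt

-- the central fact: A's per-token replacement = B's trie-based replacement
theorem pvFix_eq (m : List (List Char × List Char)) (tok : List Char) :
    pvFixA m (PySem.List.sorted (m.map (·.1)) (fun k => k.length) true) tok =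
      pvFixT (pvBuild m) tok := by
  have hEp : (PySem.List.enumerate m 0).Pairwise (fun a b => a.1 < b.1) :=
    PySem.List.pairwise_lt_enumerate m 0
  have hmap : (PySem.List.enumerate m 0).map (fun e => e.2.1) = m.map (·.1) := by
    have := PySem.List.map_snd_enumerate m 0
    calc (PySem.List.enumerate m 0).map (fun e => e.2.1)
        = ((PySem.List.enumerate m 0).map (·.2)).map (·.1) := by rw [List.map_map]; rfl
      _ = m.map (·.1) := by rw [this]
  have hsim := pvSim (fun k => !k.isEmpty && PySem.Chars.isIn k tok)
    (PySem.List.enumerate m 0) none none (fun _ => rfl) (by simp) hEp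
  rw [hmap] at hsim
  rw [pvFixA, pvFindA_eq_foldl m _, hsim, pvFixT, pvBestMatch_eq_fold]
  set CL := (PySem.List.enumerate m 0).filter
    (fun e => !e.2.1.isEmpty && PySem.Chars.isIn e.2.1 tok) with hCL
  cases hr : CL.foldl pvStepB none with
  | none =>
    have hCLnil : CL = [] := ((pvFoldl_stepB_none_iff _ _).1 hr).2
    have hallnil : pvAll (pvBuild m) tok = [] := by
      rw [List.eq_nil_iff_forall_not_mem]
      intro x hx
      obtain ⟨hne, hin, hfind⟩ := (pvMem_pvAll_iff m tok x).1 hx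
      have hxE : x ∈ PySem.List.enumerate m 0 := List.mem_of_find?_eq_some hfind
      have hxCL : x ∈ CL := by
        rw [hCL, List.mem_filter]
        exact ⟨hxE, by simp [hne, hin]⟩
      rw [hCLnil] at hxCL
      cases hxCL
    rw [hallnil]
    rfl
  | some es =>
    have hmem : es ∈ CL := by
      rcases pvFoldl_stepB_mem CL none es hr with h | h
      · exact h
      · cases h
    have hdom : ∀ y ∈ CL, pvBeats y es = false := (pvFoldl_stepB_dom CL none es hr).1
    have hesE : es ∈ PySem.List.enumerate m 0 := (List.mem_filter.1 hmem).1
    have hesP : (!es.2.1.isEmpty && PySem.Chars.isIn es.2.1 tok) = true :=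
      (List.mem_filter.1 hmem).2
    have hne : es.2.1 ≠ [] := by
      have h := hesP
      simp only [Bool.and_eq_true] at h
      simpa using h.1
    have hin : PySem.Chars.isIn es.2.1 tok = true := by
      have h := hesP
      simp only [Bool.and_eq_true] at h
      exact h.2
    have hfind : (PySem.List.enumerate m 0).find? (fun y => y.2.1 == es.2.1) = some es := by
      apply pvFind_of_min _ _ _ hEp hesE (by simp)
      intro y hy hqy
      have hkey : y.2.1 = es.2.1 := by simpa using hqy
      have hyCL : y ∈ CL := by
        rw [hCL, List.mem_filter]
        refine ⟨hy, ?_⟩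
        rw [hkey]
        exact hesP
      have := hdom y hyCL
      rw [pvBeats_false_iff] at this
      rw [hkey] at this
      omega
    have hesAll : es ∈ pvAll (pvBuild m) tok :=
      (pvMem_pvAll_iff m tok es).2 ⟨hne, hin, hfind⟩
    have hT : (pvAll (pvBuild m) tok).foldl pvStepB none = some es := by
      cases hrT : (pvAll (pvBuild m) tok).foldl pvStepB none with
      | none =>
        have : pvAll (pvBuild m) tok = [] := ((pvFoldl_stepB_none_iff _ _).1 hrT).2
        rw [this] at hesAll
        cases hesAll
      | some xT =>
        have hxTAll : xT ∈ pvAll (pvBuild m) tok := by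
          rcases pvFoldl_stepB_mem _ none xT hrT with h | h
          · exact h
          · cases h
        obtain ⟨hneT, hinT, hfindT⟩ := (pvMem_pvAll_iff m tok xT).1 hxTAll
        have hxTE : xT ∈ PySem.List.enumerate m 0 := List.mem_of_find?_eq_some hfindT
        have hxTCL : xT ∈ CL := by
          rw [hCL, List.mem_filter]
          exact ⟨hxTE, by simp [hneT, hinT]⟩
        have h1 : pvBeats xT es = false := hdom xT hxTCL
        have h2 : pvBeats es xT = false := (pvFoldl_stepB_dom _ none xT hrT).1 es hesAll
        rw [pvBeats_false_iff] at h1 h2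
        have : xT = es := pvFst_inj _ hEp xT es hxTE hesE (by omega)
        rw [this]
    rw [hT]
    have hlook : pvLookup m es.2.1 = es.2.2 := by
      have := pvEnumFind (fun p => p.1 == es.2.1) m 0
      rw [show (fun e : Int × (List Char × List Char) => e.2.1 == es.2.1) =
        (fun e : Int × (List Char × List Char) => (fun p : List Char × List Char =>
          p.1 == es.2.1) e.2) from rfl] at hfind
      rw [hfind] at this
      simp only [Option.map_some] at this
      rw [pvLookup, ← this]
      rfl
    simp only [Option.map_some]
    rw [hlook]

-- A's interleaved scanner = B's tokenizer rendered segment by segment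
theorem pvLoopA_eq_pvTok (m : List (List Char × List Char)) (ks : List (List Char))
    (rest : List Char) (out : List (List Char)) :
    pvLoopA m ks rest out =
      out ++ (pvTok rest).map (fun seg => if seg.1 then pvFixA m ks seg.2 else seg.2) := by
  induction rest using pvTok.induct generalizing out with
  | case1 => rw [pvLoopA.eq_def, pvTok.eq_def]; simp
  | case2 c rest hcond ih =>
    rw [Bool.and_eq_true] at hcond
    obtain ⟨hoc, hpk⟩ := hcond
    rw [Bool.not_eq_true'] at hpk
    rw [pvLoopA.eq_def, pvTok.eq_def]
    simp only [hoc, hpk, Bool.not_false, Bool.and_self, if_true, Bool.false_eq_true,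
      if_false, List.map_cons, ih]
    simp
  | case3 c rest hcond ih =>
    rw [pvLoopA.eq_def, pvTok.eq_def]
    simp only [Bool.and_eq_true, Bool.not_eq_true'] at hcond
    by_cases hoc : pvOpenComma c = true
    · cases rest with
      | nil => exact absurd ⟨hoc, rfl⟩ hcond
      | cons c2 t =>
        have hpk : pvPeekSkip c2 = true := by
          by_contra hh
          exact hcond ⟨hoc, by simpa using hh⟩
        simp only [hoc, hpk, if_true, Bool.not_true, Bool.and_false, Bool.false_eq_true,
          if_false, List.map_cons, ih]
        simp
    · have hoc' : pvOpenComma c = false := by simpa using hoc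
      simp only [hoc', Bool.false_and, Bool.false_eq_true, if_false, List.map_cons, ih]
      simp

-- ===== VERDICT (by name: the statement is the Claim_ definition above) =====
theorem relabel_newick_leaves_spec : Claim_equal_relabel_newick_leaves := by
  intro s mapping _
  unfold Spec_relabel_newick_leaves relabel_newick_leaves relabel_newick_leaves_alt
  rw [pvLoopA_eq_pvTok]
  simp only [List.nil_append]
  congr 1
  refine congrArg _ (List.map_congr_left fun seg _ => ?_)
  by_cases h : seg.1
  · simp only [h, if_true]
    exact pvFix_eq _ _
  · simp [h]
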